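-- pv_equiv track=rewrite | github.com/recwebtek/braindrain | braindrain/env_probe.py | _classify_apps
-- ===== SOURCE A (Python) =====
-- def _classify_apps(
--     raw_app_lines: list[str],
--     categories: dict[str, dict[str, str]],
-- ) -> dict[str, list[str]]:
--     """
--     Given a flat list of app names (from /Applications/ or brew casks),
--     classify them into category buckets using keyword matching.
--     Returns {category_name: [canonical_name, ...]}
--     """
--     result: dict[str, list[str]] = {cat: [] for cat in categories}
--     seen: set[str] = set()
--
--     for app_raw in raw_app_lines:
--         app_lower = app_raw.lower().replace(".app", "").strip()
--         for category, keywords in categories.items():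
--             for keyword, canonical in keywords.items():
--                 if keyword in app_lower and canonical not in seen:
--                     result[category].append(canonical)
--                     seen.add(canonical)
--                     break
--
--     return result
-- ===== SOURCE B (Python) =====
-- def _classify_apps(raw_app_lines, categories):
--     # n-gram index: fingerprint each app by the set of its substrings whose
--     # lengths occur among the keywords, so a keyword match is a set lookup;
--     # all string work happens in stage 1, stage 2 is a string-free selection
--     # replay over the candidate table, grouped into buckets at the end.
--     lens = {len(k) for kws in categories.values() for k in kws}
--     table = []
--     for app_raw in raw_app_lines:
--         app = app_raw.lower().replace(".app", "").strip()
--         grams = {app[i:i + L] for L in lens for i in range(len(app) - L + 1)}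
--         table.append([(cat, [c for k, c in kws.items() if k in grams])
--                       for cat, kws in categories.items()])
--     seen = set()
--     picks = []
--     for row in table:
--         for cat, cands in row:
--             chosen = next((c for c in cands if c not in seen), None)
--             if chosen is not None:
--                 seen.add(chosen)
--                 picks.append((cat, chosen))
--     return {cat: [c for p, c in picks if p == cat] for cat in categories}
-- ===== Notes on version B (the rewrite author's own statement) =====
-- stated objective: alternative
-- what changed: B replaces A's per-app nested keyword substring scans by an n-gram index: it precomputes the set of keyword lengths, fingerprints each normalised app name by the set of its substrings of exactly those lengths so each keyword match becomes one set lookup, materialises a per-app/per-category candidate table in a first stage, and runs a string-free first-unseen selection replay over that table in a second stage, grouping the picks at the end.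
import Mathlib
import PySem

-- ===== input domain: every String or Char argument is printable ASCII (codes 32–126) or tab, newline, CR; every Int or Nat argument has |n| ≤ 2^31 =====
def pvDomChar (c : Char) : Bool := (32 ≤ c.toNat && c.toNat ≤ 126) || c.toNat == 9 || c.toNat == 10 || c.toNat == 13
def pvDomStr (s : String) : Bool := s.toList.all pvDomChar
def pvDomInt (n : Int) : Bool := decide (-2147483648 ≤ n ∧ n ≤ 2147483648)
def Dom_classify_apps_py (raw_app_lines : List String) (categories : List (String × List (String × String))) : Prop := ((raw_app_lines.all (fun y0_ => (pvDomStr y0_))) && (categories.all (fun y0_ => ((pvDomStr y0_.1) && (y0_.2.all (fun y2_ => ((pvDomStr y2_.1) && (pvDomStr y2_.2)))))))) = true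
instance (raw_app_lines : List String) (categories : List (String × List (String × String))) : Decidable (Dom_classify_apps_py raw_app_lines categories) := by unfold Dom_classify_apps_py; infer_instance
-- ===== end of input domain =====

-- B replaces A's per-app nested keyword substring scans by an n-gram index
-- (fingerprint each app by its substrings of the keyword lengths, match by set
-- lookup, then a string-free staged selection replay); objective: alternative.

-- ===== PORT A =====
-- app_raw.lower().replace(".app", "").strip()
def pvNormA (s : String) : String :=
  PySem.Str.strip (PySem.Str.replace (PySem.Str.lower s) ".app" "")

-- the dict-typed parameter denotes a Python dict: duplicate keys collapse as in
-- dict(pairs) (last value wins, first position), nested keyword dicts likewise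
def pvCatsA (categories : List (String × List (String × String))) :
    List (String × List (String × String)) :=
  (PySem.Dict.ofList categories).items.map
    (fun p => (p.1, (PySem.Dict.ofList p.2).items))

-- 'for keyword, canonical in keywords.items(): if … : append; add; break'
def pvKwLoopA (app cat : String) :
    List (String × String) →
    PySem.Dict String (List String) × PySem.Set String →
    PySem.Dict String (List String) × PySem.Set String
  | [], st => st
  | (k, c) :: rest, (d, s) =>
      if PySem.Str.isIn k app && !(PySem.Set.contains s c) then
        (d.modify cat [] (fun l => l ++ [c]), PySem.Set.add s c)
      else pvKwLoopA app cat rest (d, s)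

def classify_apps_py (raw_app_lines : List String) (categories : List (String × List (String × String))) : List (String × List String) :=
  let cats := pvCatsA categories
  -- result = {cat: [] for cat in categories}
  let init : PySem.Dict String (List String) :=
    cats.foldl (fun d p => d.insert p.1 ([] : List String)) PySem.Dict.empty
  -- for app_raw in raw_app_lines: for category, keywords in categories.items(): …
  let fin := raw_app_lines.foldl
    (fun st app_raw =>
      let app := pvNormA app_raw
      cats.foldl (fun st p => pvKwLoopA app p.1 p.2 st) st)
    (init, (PySem.Set.empty : PySem.Set String))
  fin.1.items

-- ===== PORT B =====
def pvNormB (s : String) : String :=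
  PySem.Str.strip (PySem.Str.replace (PySem.Str.lower s) ".app" "")

def pvCatsB (categories : List (String × List (String × String))) :
    List (String × List (String × String)) :=
  (PySem.Dict.ofList categories).items.map
    (fun p => (p.1, (PySem.Dict.ofList p.2).items))

-- lens = {len(k) for kws in categories.values() for k in kws}
def pvLensB (cats : List (String × List (String × String))) : PySem.Set Int :=
  PySem.Set.ofList (cats.flatMap (fun p => p.2.map (fun q => PySem.Str.len q.1)))

-- grams = {app[i:i+L] for L in lens for i in range(len(app) - L + 1)}
def pvGramsB (lens : PySem.Set Int) (app : String) : PySem.Set String :=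
  PySem.Set.ofList (lens.flatMap (fun L =>
    (PySem.List.pyRange 0 (PySem.Str.len app - L + 1) 1).map
      (fun i => PySem.Str.slice app (some i) (some (i + L)))))

-- next((c for c in cands if c not in seen), None)
def pvPickB (s : PySem.Set String) : List String → Option String
  | [] => none
  | c :: rest => if PySem.Set.contains s c then pvPickB s rest else some c

def classify_apps_py_alt (raw_app_lines : List String) (categories : List (String × List (String × String))) : List (String × List String) :=
  let cats := pvCatsB categories
  let lens := pvLensB cats
  -- stage 1: candidate table (all string work)
  let table := raw_app_lines.map (fun app_raw =>
    let app := pvNormB app_raw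
    let grams := pvGramsB lens app
    cats.map (fun p =>
      (p.1, (p.2.filter (fun q => PySem.Set.contains grams q.1)).map (fun q => q.2))))
  -- stage 2: string-free selection replay
  let fin := table.foldl (fun st row =>
    row.foldl (fun (st : PySem.Set String × List (String × String)) cell =>
      match pvPickB st.1 cell.2 with
      | none => st
      | some c => (PySem.Set.add st.1 c, st.2 ++ [(cell.1, c)])) st)
    ((PySem.Set.empty : PySem.Set String), ([] : List (String × String)))
  cats.map (fun p => (p.1, (fin.2.filter (fun e => e.1 == p.1)).map (fun e => e.2)))

-- ===== PRECONDITION & SPEC =====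
def Spec_classify_apps_py (raw_app_lines : List String) (categories : List (String × List (String × String))) (out : List (String × List String)) : Prop := out = classify_apps_py_alt raw_app_lines categories
instance (raw_app_lines : List String) (categories : List (String × List (String × String))) (out : List (String × List String)) : Decidable (Spec_classify_apps_py raw_app_lines categories out) := by unfold Spec_classify_apps_py; infer_instance

-- ===== CLAIM (what is proved, stated in full; the proofs are below) =====
def Claim_equal_classify_apps_py : Prop := ∀ (raw_app_lines : List String) (categories : List (String × List (String × String))), Dom_classify_apps_py raw_app_lines categories → Spec_classify_apps_py raw_app_lines categories (classify_apps_py raw_app_lines categories)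

-- ===== LEMMAS AND PROOFS =====

-- replay a claim stream into the result dict, A-style
def pvApply (d : PySem.Dict String (List String)) (es : List (String × String)) :
    PySem.Dict String (List String) :=
  es.foldl (fun d e => d.modify e.1 [] (fun l => l ++ [e.2])) d

-- first keyword of one category that matches with an unseen canonical
def pvScan (app : String) (s : PySem.Set String) :
    List (String × String) → Option String
  | [] => none
  | (k, c) :: rest =>
      if PySem.Str.isIn k app && !(PySem.Set.contains s c) then some c
      else pvScan app s rest

-- reference: claims of one app over the category list, threading seen
def pvRef (app : String) :
    List (String × List (String × String)) → PySem.Set String →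
    List (String × String) × PySem.Set String
  | [], s => ([], s)
  | (cat, kws) :: rest, s =>
      match pvScan app s kws with
      | none => pvRef app rest s
      | some c =>
          let r := pvRef app rest (PySem.Set.add s c)
          ((cat, c) :: r.1, r.2)

-- the n-gram fingerprint answers exactly 'k in app' for any k of a listed length
theorem pv_gram (lens : PySem.Set Int) (app k : String)
    (hk : PySem.Str.len k ∈ (lens : List Int))
    (hpos : ∀ L ∈ (lens : List Int), 0 ≤ L) :
    PySem.Set.contains (pvGramsB lens app) k = PySem.Str.isIn k app := by
  have hmem : k ∈ (pvGramsB lens app : List String) ↔ PySem.Str.isIn k app = true := by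
    constructor
    · intro h
      unfold pvGramsB at h
      rw [PySem.Set.mem_ofList] at h
      obtain ⟨L, hL, hm⟩ := List.mem_flatMap.mp h
      obtain ⟨i, hi, hslice⟩ := List.mem_map.mp hm
      rw [PySem.List.mem_pyRange_one] at hi
      have hL0 := hpos L hL
      obtain ⟨a, rfl⟩ : ∃ a : Nat, i = (a : Int) := ⟨i.toNat, (Int.toNat_of_nonneg hi.1).symm⟩
      obtain ⟨d, rfl⟩ : ∃ d : Nat, L = (d : Int) := ⟨L.toNat, (Int.toNat_of_nonneg hL0).symm⟩
      have htl : k.toList = (app.toList.drop a).take d := by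
        rw [← hslice]
        simp [PySem.Str.toList_slice, PySem.List.slice_natCast_add]
      rw [PySem.Str.isIn_iff_infix, htl]
      exact (List.take_prefix d _).isInfix.trans (List.drop_suffix a app.toList).isInfix
    · intro h
      rw [PySem.Str.isIn_iff_infix] at h
      obtain ⟨pre, suf, hps⟩ := h
      have hlen : PySem.Str.len k = (k.toList.length : Int) := by simp [PySem.Str.len_eq]
      have hlapp : PySem.Str.len app = (app.toList.length : Int) := by simp [PySem.Str.len_eq]
      have hsum : pre.length + k.toList.length + suf.length = app.toList.length := by
        rw [← hps]; simp; omega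
      unfold pvGramsB
      rw [PySem.Set.mem_ofList]
      refine List.mem_flatMap.mpr ⟨PySem.Str.len k, hk, List.mem_map.mpr
        ⟨(pre.length : Int), ?_, ?_⟩⟩
      · rw [PySem.List.mem_pyRange_one]
        refine ⟨Int.natCast_nonneg _, ?_⟩
        rw [hlen, hlapp]
        omega
      · apply String.toList_inj.mp
        rw [hlen]
        simp only [PySem.Str.toList_slice, PySem.Chars.slice_eq_listSlice]
        rw [PySem.List.slice_natCast_add, ← hps, List.append_assoc, List.drop_left]
        exact List.take_left
  by_cases hc : PySem.Set.contains (pvGramsB lens app) k = true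
  · rw [hc]
    exact (hmem.mp ((PySem.Set.contains_iff _ _).mp hc)).symm
  · simp only [Bool.not_eq_true] at hc
    rw [hc]
    cases hin : PySem.Str.isIn k app with
    | false => rfl
    | true =>
        have hct := (PySem.Set.contains_iff (pvGramsB lens app) k).mpr (hmem.mpr hin)
        rw [hc] at hct
        exact absurd hct (by simp)

-- one table cell replayed = A's keyword scan of that category
theorem pv_cellB (lens : PySem.Set Int) (app : String) (s : PySem.Set String)
    (kws : List (String × String))
    (hk : ∀ q ∈ kws, PySem.Str.len q.1 ∈ (lens : List Int))
    (hpos : ∀ L ∈ (lens : List Int), 0 ≤ L) :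
    pvPickB s ((kws.filter (fun q => PySem.Set.contains (pvGramsB lens app) q.1)).map (fun q => q.2))
      = pvScan app s kws := by
  induction kws with
  | nil => rfl
  | cons q rest ih =>
      obtain ⟨k, c⟩ := q
      have hkk : PySem.Set.contains (pvGramsB lens app) k = PySem.Str.isIn k app :=
        pv_gram lens app k (hk (k, c) (by simp)) hpos
      have ih' := ih (fun q hq => hk q (by simp [hq]))
      cases hin : PySem.Str.isIn k app with
      | false =>
          simp only [List.filter_cons, hkk, hin, pvScan]
          simpa [hin] using ih'
      | true =>
          simp only [List.filter_cons, hkk, hin, pvScan, if_true, List.map_cons, pvPickB]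
          by_cases hc : PySem.Set.contains s c = true
          · simp only [hc, if_true, Bool.not_true, Bool.and_false]
            simpa using ih'
          · simp only [Bool.not_eq_true] at hc
            simp only [hc, Bool.not_false, Bool.and_true]
            simp

-- one table row replayed = pvRef
theorem pv_rowB (lens : PySem.Set Int) (app : String)
    (cats : List (String × List (String × String)))
    (s : PySem.Set String) (es : List (String × String))
    (hk : ∀ p ∈ cats, ∀ q ∈ p.2, PySem.Str.len q.1 ∈ (lens : List Int))
    (hpos : ∀ L ∈ (lens : List Int), 0 ≤ L) :
    (cats.map (fun p =>
        (p.1, (p.2.filter (fun q => PySem.Set.contains (pvGramsB lens app) q.1)).map (fun q => q.2)))).foldl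
      (fun (st : PySem.Set String × List (String × String)) cell =>
        match pvPickB st.1 cell.2 with
        | none => st
        | some c => (PySem.Set.add st.1 c, st.2 ++ [(cell.1, c)])) (s, es)
      = ((pvRef app cats s).2, es ++ (pvRef app cats s).1) := by
  induction cats generalizing s es with
  | nil => simp [pvRef]
  | cons p rest ih =>
      obtain ⟨cat, kws⟩ := p
      simp only [List.map_cons, List.foldl_cons, pvRef]
      rw [pv_cellB lens app s kws (hk (cat, kws) (by simp)) hpos]
      cases hscan : pvScan app s kws with
      | none => simpa using ih s es (fun p hp => hk p (by simp [hp]))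
      | some c =>
          simpa using ih (PySem.Set.add s c) (es ++ [(cat, c)])
            (fun p hp => hk p (by simp [hp]))

theorem pv_kwA (app cat : String) (kws : List (String × String))
    (d : PySem.Dict String (List String)) (s : PySem.Set String) :
    pvKwLoopA app cat kws (d, s)
      = match pvScan app s kws with
        | none => (d, s)
        | some c => (d.modify cat [] (fun l => l ++ [c]), PySem.Set.add s c) := by
  induction kws generalizing d s with
  | nil => rfl
  | cons q rest ih =>
      obtain ⟨k, c⟩ := q
      simp only [pvKwLoopA, pvScan]
      split_ifs with h
      · rfl
      · exact ih d s

theorem pv_innerA (app : String) (cats : List (String × List (String × String)))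
    (d : PySem.Dict String (List String)) (s : PySem.Set String) :
    cats.foldl (fun st p => pvKwLoopA app p.1 p.2 st) (d, s)
      = (pvApply d (pvRef app cats s).1, (pvRef app cats s).2) := by
  induction cats generalizing d s with
  | nil => rfl
  | cons p rest ih =>
      obtain ⟨cat, kws⟩ := p
      simp only [List.foldl_cons, pvRef, pv_kwA]
      cases h : pvScan app s kws with
      | none => simpa using ih d s
      | some c => simpa [pvApply] using ih (d.modify cat [] (fun l => l ++ [c])) (PySem.Set.add s c)

theorem pv_ref_cats (app : String) (cats : List (String × List (String × String)))
    (s : PySem.Set String) :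
    ∀ e ∈ (pvRef app cats s).1, e.1 ∈ cats.map Prod.fst := by
  induction cats generalizing s with
  | nil => simp [pvRef]
  | cons p rest ih =>
      obtain ⟨cat, kws⟩ := p
      intro e he
      simp only [pvRef] at he
      cases hscan : pvScan app s kws with
      | none =>
          rw [hscan] at he
          exact List.mem_cons_of_mem _ (ih s e he)
      | some c =>
          rw [hscan] at he
          simp only [List.mem_cons] at he
          rcases he with rfl | he
          · simp
          · exact List.mem_cons_of_mem _ (ih (PySem.Set.add s c) e he)

-- both outer loops thread the same (claims, seen) stream
theorem pv_outer (apps : List String) (cats : List (String × List (String × String)))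
    (lens : PySem.Set Int)
    (hk : ∀ p ∈ cats, ∀ q ∈ p.2, PySem.Str.len q.1 ∈ (lens : List Int))
    (hpos : ∀ L ∈ (lens : List Int), 0 ≤ L)
    (d : PySem.Dict String (List String)) (s : PySem.Set String)
    (es : List (String × String)) :
    (apps.foldl
        (fun st app_raw =>
          cats.foldl (fun st p => pvKwLoopA (pvNormA app_raw) p.1 p.2 st) st)
        (pvApply d es, s))
      = (pvApply d
          (apps.foldl
            (fun (st : PySem.Set String × List (String × String)) app_raw =>
              (cats.map (fun p =>
                (p.1, (p.2.filter (fun q => PySem.Set.contains (pvGramsB lens (pvNormB app_raw)) q.1)).map (fun q => q.2)))).foldl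
                (fun (st : PySem.Set String × List (String × String)) cell =>
                  match pvPickB st.1 cell.2 with
                  | none => st
                  | some c => (PySem.Set.add st.1 c, st.2 ++ [(cell.1, c)])) st) (s, es)).2,
         (apps.foldl
            (fun (st : PySem.Set String × List (String × String)) app_raw =>
              (cats.map (fun p =>
                (p.1, (p.2.filter (fun q => PySem.Set.contains (pvGramsB lens (pvNormB app_raw)) q.1)).map (fun q => q.2)))).foldl
                (fun (st : PySem.Set String × List (String × String)) cell =>
                  match pvPickB st.1 cell.2 with
                  | none => st
                  | some c => (PySem.Set.add st.1 c, st.2 ++ [(cell.1, c)])) st) (s, es)).1) := by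
  induction apps generalizing s es with
  | nil => rfl
  | cons a rest ih =>
      simp only [List.foldl_cons]
      have hnorm : pvNormA a = pvNormB a := rfl
      rw [hnorm, pv_innerA (pvNormB a) cats (pvApply d es) s]
      have happ : pvApply (pvApply d es) (pvRef (pvNormB a) cats s).1
          = pvApply d (es ++ (pvRef (pvNormB a) cats s).1) := by
        simp [pvApply, List.foldl_append]
      rw [happ, pv_rowB lens (pvNormB a) cats s es hk hpos]
      exact ih (pvRef (pvNormB a) cats s).2 (es ++ (pvRef (pvNormB a) cats s).1)

-- every claim in the stream names a category of cats
theorem pv_outer_events (apps : List String)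
    (cats : List (String × List (String × String)))
    (lens : PySem.Set Int)
    (hk : ∀ p ∈ cats, ∀ q ∈ p.2, PySem.Str.len q.1 ∈ (lens : List Int))
    (hpos : ∀ L ∈ (lens : List Int), 0 ≤ L)
    (s : PySem.Set String) (es : List (String × String)) :
    ∀ e ∈ (apps.foldl
            (fun (st : PySem.Set String × List (String × String)) app_raw =>
              (cats.map (fun p =>
                (p.1, (p.2.filter (fun q => PySem.Set.contains (pvGramsB lens (pvNormB app_raw)) q.1)).map (fun q => q.2)))).foldl
                (fun (st : PySem.Set String × List (String × String)) cell =>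
                  match pvPickB st.1 cell.2 with
                  | none => st
                  | some c => (PySem.Set.add st.1 c, st.2 ++ [(cell.1, c)])) st) (s, es)).2,
      e ∈ es ∨ e.1 ∈ cats.map Prod.fst := by
  induction apps generalizing s es with
  | nil => intro e he; exact Or.inl he
  | cons a rest ih =>
      intro e he
      simp only [List.foldl_cons] at he
      rw [pv_rowB lens (pvNormB a) cats s es hk hpos] at he
      rcases ih (pvRef (pvNormB a) cats s).2 (es ++ (pvRef (pvNormB a) cats s).1) e he with hmem | hcat
      · rcases List.mem_append.mp hmem with h1 | h2
        · exact Or.inl h1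
        · exact Or.inr (pv_ref_cats (pvNormB a) cats s e h2)
      · exact Or.inr hcat

theorem pv_items_init (cats : List (String × List (String × String)))
    (d : PySem.Dict String (List String))
    (hnd : (cats.map Prod.fst).Nodup)
    (h : ∀ x ∈ cats.map Prod.fst, d.contains x = false) :
    (cats.foldl (fun d p => d.insert p.1 ([] : List String)) d).items
      = d.items ++ cats.map (fun p => (p.1, ([] : List String))) := by
  induction cats generalizing d with
  | nil => simp
  | cons p rest ih =>
      have h1 : d.contains p.1 = false := h p.1 (by simp)
      have h' : (p.1 :: rest.map Prod.fst).Nodup := by simpa using hnd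
      simp only [List.foldl_cons, List.map_cons]
      rw [ih (d.insert p.1 []) (List.nodup_cons.mp h').2
        (fun x hx => by
          rw [PySem.Dict.contains_insert]
          have hxne : x ≠ p.1 := fun hh => (List.nodup_cons.mp h').1 (hh ▸ hx)
          simp [hxne, h x (by simp [hx])])]
      rw [PySem.Dict.items_insert_of_not_contains _ _ h1]
      simp

theorem pv_items_apply (es : List (String × String))
    (d : PySem.Dict String (List String))
    (hk : d.keys.Nodup) (hm : ∀ e ∈ es, d.contains e.1 = true) :
    (pvApply d es).items
      = d.items.map (fun p =>
          (p.1, p.2 ++ (es.filter (fun e => e.1 == p.1)).map (fun e => e.2))) := by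
  induction es generalizing d with
  | nil => simp [pvApply]
  | cons e es ih =>
      have hc : d.contains e.1 = true := hm e (by simp)
      have hd' : (d.modify e.1 [] (fun l => l ++ [e.2])).items
          = d.items.map (fun p => if p.1 == e.1 then (p.1, p.2 ++ [e.2]) else p) := by
        rw [PySem.Dict.modify, PySem.Dict.items_insert_of_contains _ _ hc]
        apply List.map_congr_left
        intro p hp
        by_cases hpe : p.1 = e.1
        · have hmem : (e.1, p.2) ∈ d.items := by rw [← hpe]; exact hp
          have hg : d.getD e.1 [] = p.2 := PySem.Dict.getD_of_mem_items _ hmem hk []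
          simp [hpe, hg]
        · simp [hpe]
      have hk' : (d.modify e.1 [] (fun l => l ++ [e.2])).keys.Nodup := by
        rw [PySem.Dict.keys_modify, PySem.Dict.keys_insert_of_contains _ _ hc]
        exact hk
      have hm' : ∀ e2 ∈ es, (d.modify e.1 [] (fun l => l ++ [e.2])).contains e2.1 = true := by
        intro e2 h2
        rw [PySem.Dict.contains_modify]
        simp [hm e2 (by simp [h2])]
      have hih := ih (d.modify e.1 [] (fun l => l ++ [e.2])) hk' hm'
      simp only [pvApply, List.foldl_cons] at *
      rw [hih, hd', List.map_map]
      apply List.map_congr_left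
      intro p hp
      by_cases hpe : p.1 = e.1
      · simp [Function.comp, hpe]
      · simp [Function.comp, hpe, Ne.symm hpe]

theorem pv_cats_nodup (categories : List (String × List (String × String))) :
    ((pvCatsA categories).map Prod.fst).Nodup := by
  have h := PySem.Dict.nodup_keys_ofList (κ := String) (ν := List (String × String)) categories
  simpa [pvCatsA, PySem.Dict.keys, List.map_map, Function.comp] using h

-- ===== VERDICT (by name: the statement is the Claim_ definition above) =====
theorem classify_apps_py_spec : Claim_equal_classify_apps_py := by
  intro raw cats0 _
  unfold Spec_classify_apps_py classify_apps_py classify_apps_py_alt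
  simp only [show pvCatsB = pvCatsA from rfl]
  have hnd := pv_cats_nodup cats0
  set cats := pvCatsA cats0 with hcats
  set lens := pvLensB cats with hlens
  have hk : ∀ p ∈ cats, ∀ q ∈ p.2, PySem.Str.len q.1 ∈ (lens : List Int) := by
    intro p hp q hq
    rw [hlens]
    unfold pvLensB
    rw [PySem.Set.mem_ofList]
    exact List.mem_flatMap.mpr ⟨p, hp, List.mem_map.mpr ⟨q, hq, rfl⟩⟩
  have hpos : ∀ L ∈ (lens : List Int), 0 ≤ L := by
    intro L hL
    rw [hlens] at hL
    unfold pvLensB at hL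
    rw [PySem.Set.mem_ofList] at hL
    obtain ⟨p, _, hm⟩ := List.mem_flatMap.mp hL
    obtain ⟨q, _, rfl⟩ := List.mem_map.mp hm
    simp [PySem.Str.len_eq]
  set init : PySem.Dict String (List String) :=
    cats.foldl (fun d p => d.insert p.1 ([] : List String)) PySem.Dict.empty with hinit
  have hkeys : init.keys = PySem.Set.ofList (cats.map Prod.fst) := by
    rw [hinit, PySem.Dict.keys_foldl_insert_key cats Prod.fst (fun _ _ => ([] : List String))]
    simp [PySem.Dict.empty, PySem.Set.update_nil_left]
  have hknd : init.keys.Nodup := by rw [hkeys]; exact PySem.Set.nodup_ofList _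
  have hcont : ∀ x ∈ cats.map Prod.fst, init.contains x = true := by
    intro x hx
    rw [PySem.Dict.contains_iff_mem_keys, hkeys]
    exact (PySem.Set.mem_ofList _ _).mpr hx
  have hitems : init.items = cats.map (fun p => (p.1, ([] : List String))) := by
    rw [hinit, pv_items_init cats PySem.Dict.empty hnd (fun x _ => PySem.Dict.contains_empty _)]
    simp [show PySem.Dict.empty.items = ([] : List (String × List String)) from rfl]
  rw [List.foldl_map]
  have hmain := pv_outer raw cats lens hk hpos init PySem.Set.empty []
  rw [show pvApply init [] = init from rfl] at hmain
  rw [hmain]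
  have hfin := pv_outer_events raw cats lens hk hpos PySem.Set.empty []
  rw [pv_items_apply _ init hknd (fun e he => by
    rcases hfin e he with h1 | h2
    · simp at h1
    · exact hcont e.1 h2)]
  rw [hitems, List.map_map]
  simp [Function.comp]
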